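-- pv_equiv track=rewrite | github.com/USC-EE-250L-Spring-2023/lab-10-jaya-lab10 | main.py | process1
-- ===== SOURCE A (Python) =====
-- from typing import List, Optional
--
-- def process1(data: List[int]) -> List[int]:
--     """TODO: Document this function. What does it do? What are the inputs and outputs?"""
--     """Run the program, offloading the specified function(s) to the server.
--
--     Args:
--         offload: Which function(s) to offload to the server. Can be None, 'process1', 'process2', or 'both'.
--
--     Returns:
--         float: the final result of the program.
--     """
--     def foo(x):
--         """Find the next largest prime number."""
--         while True:
--             x += 1
--             if all(x % i for i in range(2, x)):
--                 return x
--     return [foo(x) for x in data]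
-- ===== SOURCE B (Python) =====
-- from typing import List
--
--
-- def is_prime(n):
--     """Trial division up to the square root; values <= 2 count as 'prime'
--     (matching the vacuous range(2, n) test of the original)."""
--     if n <= 2:
--         return True
--     i = 2
--     while i * i <= n:
--         if n % i == 0:
--             return False
--         i += 1
--     return True
--
--
-- def process1(data: List[int]) -> List[int]:
--     out = []
--     for x in data:
--         c = x + 1
--         while not is_prime(c):
--             c += 1
--         out.append(c)
--     return out
-- ===== Notes on version B (the rewrite author's own statement) =====
-- stated objective: faster
-- what changed: The inner next-prime search now uses a factored-out is_prime predicate doing trial division only up to sqrt(c) (stopping at the first divisor), instead of testing every i in range(2, c).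
import Mathlib
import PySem

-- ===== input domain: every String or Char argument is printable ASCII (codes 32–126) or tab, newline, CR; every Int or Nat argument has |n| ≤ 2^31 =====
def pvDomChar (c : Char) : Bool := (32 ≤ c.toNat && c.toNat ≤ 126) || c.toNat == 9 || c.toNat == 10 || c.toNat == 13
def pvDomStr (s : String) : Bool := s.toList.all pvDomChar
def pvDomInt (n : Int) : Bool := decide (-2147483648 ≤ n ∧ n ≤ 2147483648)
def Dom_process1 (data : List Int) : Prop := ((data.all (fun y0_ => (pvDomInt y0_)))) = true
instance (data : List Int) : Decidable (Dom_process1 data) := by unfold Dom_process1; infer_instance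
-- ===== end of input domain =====

-- B replaces the full trial division `all(x % i for i in range(2, x))` by a factored-out
-- is_prime predicate that stops at the first divisor ≤ √c (faster test, same values).

-- ===== PORT A =====
-- the loop test: `all(x % i for i in range(2, x))`
def goodA (n : Int) : Bool :=
  (PySem.List.pyRange 2 n 1).all (fun i => !(PySem.Int.mod n i == 0))

-- `while True: x += 1; if …: return x` — fuel is only a totality guard for the
-- unbounded loop (on fuel 0 it gives up after the increment)
def fooA : Nat → Int → Int
  | 0, x => x + 1
  | Nat.succ f, x =>
    let y := x + 1
    if goodA y then y else fooA f y

def process1 (data : List Int) : List Int :=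
  data.map (fun x => fooA (x.toNat + 2) x)

-- ===== PORT B =====
-- `i = 2; while i * i <= n: …` of is_prime; terminates because i grows toward √n
def isPrimeLoop (n : Int) (i : Int) : Bool :=
  if h : i * i ≤ n then
    if PySem.Int.mod n i == 0 then false
    else isPrimeLoop n (i + 1)
  else true
termination_by (n + 1 - i).toNat
decreasing_by
  have hi : i ≤ n := by
    by_cases h0 : i ≤ 0
    · have := mul_self_nonneg i; omega
    · have := mul_le_mul_of_nonneg_left (show (1:Int) ≤ i by omega) (show (0:Int) ≤ i by omega)
      omega
  omega

def is_prime (n : Int) : Bool :=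
  if n ≤ 2 then true else isPrimeLoop n 2

-- `c = x + 1; while not is_prime(c): c += 1` — same fuel guard as A's loop
def fooB : Nat → Int → Int
  | 0, c => c
  | Nat.succ f, c => if is_prime c then c else fooB f (c + 1)

def process1_alt (data : List Int) : List Int :=
  data.map (fun x => fooB (x.toNat + 2) (x + 1))

-- ===== PRECONDITION & SPEC =====
def Spec_process1 (data : List Int) (out : List Int) : Prop := out = process1_alt data
instance (data : List Int) (out : List Int) : Decidable (Spec_process1 data out) := by unfold Spec_process1; infer_instance

-- ===== CLAIM (what is proved, stated in full; the proofs are below) =====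
def Claim_equal_process1 : Prop := ∀ (data : List Int), Dom_process1 data → Spec_process1 data (process1 data)

-- ===== LEMMAS AND PROOFS =====

-- characterisation of B's inner loop
theorem isPrimeLoop_iff (n i : Int) (hi : 0 ≤ i) :
    isPrimeLoop n i = true ↔ ∀ j : Int, i ≤ j → j * j ≤ n → PySem.Int.mod n j ≠ 0 := by
  induction i using isPrimeLoop.induct (n := n) with
  | case1 i h hm =>
    rw [isPrimeLoop]
    simp only [dif_pos h, if_pos hm]
    constructor
    · intro H; exact absurd H (by simp)
    · intro H
      exact absurd (by simpa using hm) (H i le_rfl h)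
  | case2 i h hm ih =>
    rw [isPrimeLoop, dif_pos h, if_neg hm, ih (by omega)]
    constructor
    · intro H j hj hjj
      rcases eq_or_lt_of_le hj with rfl | hlt
      · simpa using hm
      · exact H j (by omega) hjj
    · intro H j hj hjj
      exact H j (by omega) hjj
  | case3 i h =>
    rw [isPrimeLoop]
    simp only [dif_neg h]
    constructor
    · intro _ j hj hjj
      exfalso
      have : i * i ≤ j * j := mul_le_mul hj hj hi (le_trans hi hj)
      omega
    · intro _; trivial

-- the two primality tests agree on every integer
theorem test_eq (n : Int) : goodA n = is_prime n := by
  by_cases hn : n ≤ 2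
  · rw [goodA, is_prime, if_pos hn, PySem.List.pyRange_one_eq_nil (by omega)]
    rfl
  · push Not at hn
    rw [Bool.eq_iff_iff]
    rw [goodA, is_prime, if_neg (by omega)]
    rw [isPrimeLoop_iff n 2 (by omega)]
    simp only [List.all_eq_true, PySem.List.mem_pyRange_one, Bool.not_eq_eq_eq_not,
      Bool.not_true, beq_eq_false_iff_ne, ne_eq, and_imp]
    constructor
    · intro H j h2 hjj
      have hj : j < n := by nlinarith
      exact H j h2 hj
    · intro H i h2 hlt hmod
      have hdvd : i ∣ n := (PySem.Int.mod_eq_zero_iff_dvd n i).mp hmod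
      obtain ⟨k, hk⟩ := hdvd
      have hk2 : 2 ≤ k := by
        by_cases h1 : k ≤ 1
        · nlinarith
        · omega
      by_cases hsq : i * i ≤ n
      · exact H i h2 hsq ((PySem.Int.mod_eq_zero_iff_dvd n i).mpr ⟨k, hk⟩)
      · have hki : k < i := by nlinarith
        have hksq : k * k ≤ n := by nlinarith
        exact H k hk2 hksq ((PySem.Int.mod_eq_zero_iff_dvd n k).mpr ⟨i, by linarith [hk, mul_comm i k]⟩)

-- the two fueled loops coincide
theorem foo_eq (f : Nat) (x : Int) : fooA f x = fooB f (x + 1) := by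
  induction f generalizing x with
  | zero => rfl
  | succ f ih =>
    show (if goodA (x+1) then x+1 else fooA f (x+1)) =
         (if is_prime (x+1) then x+1 else fooB f (x+1+1))
    rw [test_eq (x+1)]
    by_cases h : is_prime (x + 1)
    · simp [h]
    · simp [h, ih (x+1)]

-- ===== VERDICT (by name: the statement is the Claim_ definition above) =====
theorem process1_spec : Claim_equal_process1 := by
  intro data _
  unfold Spec_process1 process1 process1_alt
  exact List.map_congr_left (fun x _ => foo_eq (x.toNat + 2) x)
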